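-- pv_equiv track=rewrite | github.com/luisflaviomf/SourceAddonOptimizer | worker/worker_main.py | _extract_mesh_token_from_line
-- ===== SOURCE A (Python) =====
-- def _extract_mesh_token_from_line(line: str) -> str | None:
--     toks = line.replace("\t", " ").split()
--     for t in reversed(toks):
--         tt = t.strip().strip('"').strip()
--         if tt.lower().endswith((".smd", ".dmx")):
--             return tt
--     for t in reversed(toks):
--         tt = t.strip().strip('"').strip()
--         low = tt.lower()
--         if not tt:
--             continue
--         if low in ("studio", "blank"):
--             continue
--         if low.startswith("$"):
--             continue
--         return tt
--     return None
-- ===== SOURCE B (Python) =====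
-- def _extract_mesh_token_from_line(line: str) -> str | None:
--     fallback = None
--     for t in reversed(line.replace("\t", " ").split()):
--         tt = t.strip().strip('"').strip()
--         low = tt.lower()
--         if low.endswith(".smd") or low.endswith(".dmx"):
--             return tt
--         if fallback is None and tt and low not in ("studio", "blank") and not low.startswith("$"):
--             fallback = tt
--     return fallback
-- ===== Notes on version B (the rewrite author's own statement) =====
-- stated objective: alternative
-- what changed: Replaces A's two reversed passes (first hunting a .smd/.dmx token, then rescanning for a fallback token) by a single reversed pass that returns a mesh token immediately and latches the first acceptable fallback into one variable.
import Mathlib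
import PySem

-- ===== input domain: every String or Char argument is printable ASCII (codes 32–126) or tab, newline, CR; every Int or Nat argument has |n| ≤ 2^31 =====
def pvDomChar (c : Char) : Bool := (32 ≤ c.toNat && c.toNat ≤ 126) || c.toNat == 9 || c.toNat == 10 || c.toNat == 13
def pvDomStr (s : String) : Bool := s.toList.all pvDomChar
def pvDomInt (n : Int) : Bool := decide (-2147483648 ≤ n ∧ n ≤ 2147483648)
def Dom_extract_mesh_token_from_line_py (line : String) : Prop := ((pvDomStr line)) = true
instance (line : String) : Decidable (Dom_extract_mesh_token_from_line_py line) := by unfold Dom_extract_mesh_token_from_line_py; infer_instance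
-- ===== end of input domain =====

-- B merges A's two reversed passes into one reversed pass with a latched fallback variable (objective: alternative).

-- ===== PORT A =====
-- first loop: return the last token (in original order) ending in .smd/.dmx
def pvA_loop1 : List String → Option String
  | [] => none
  | t :: rest =>
    let tt := PySem.Str.strip (PySem.Str.stripChars (PySem.Str.strip t) "\"")
    if PySem.Str.endswith (PySem.Str.lower tt) ".smd" || PySem.Str.endswith (PySem.Str.lower tt) ".dmx"
    then some tt
    else pvA_loop1 rest

-- second loop: return the last token that is non-empty, not studio/blank, not a $-command
def pvA_loop2 : List String → Option String
  | [] => none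
  | t :: rest =>
    let tt := PySem.Str.strip (PySem.Str.stripChars (PySem.Str.strip t) "\"")
    let low := PySem.Str.lower tt
    if tt == "" then pvA_loop2 rest
    else if low == "studio" || low == "blank" then pvA_loop2 rest
    else if PySem.Str.startswith low "$" then pvA_loop2 rest
    else some tt

def extract_mesh_token_from_line_py (line : String) : Option String :=
  let toks := PySem.Str.split₀ (PySem.Str.replace line "\t" " ")
  match pvA_loop1 toks.reverse with
  | some v => some v
  | none => pvA_loop2 toks.reverse

-- ===== PORT B =====
-- single reversed pass carrying the fallback accumulator
def pvB_loop : List String → Option String → Option String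
  | [], fb => fb
  | t :: rest, fb =>
    let tt := PySem.Str.strip (PySem.Str.stripChars (PySem.Str.strip t) "\"")
    let low := PySem.Str.lower tt
    if PySem.Str.endswith low ".smd" || PySem.Str.endswith low ".dmx" then some tt
    else
      let fb' := if fb.isNone && !(tt == "") && !(low == "studio") && !(low == "blank")
                    && !(PySem.Str.startswith low "$")
                 then some tt else fb
      pvB_loop rest fb'

def extract_mesh_token_from_line_py_alt (line : String) : Option String :=
  pvB_loop (PySem.Str.split₀ (PySem.Str.replace line "\t" " ")).reverse none

-- ===== PRECONDITION & SPEC =====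
def Spec_extract_mesh_token_from_line_py (line : String) (out : Option String) : Prop := out = extract_mesh_token_from_line_py_alt line
instance (line : String) (out : Option String) : Decidable (Spec_extract_mesh_token_from_line_py line out) := by unfold Spec_extract_mesh_token_from_line_py; infer_instance

-- ===== CLAIM (what is proved, stated in full; the proofs are below) =====
def Claim_equal_extract_mesh_token_from_line_py : Prop := ∀ (line : String), Dom_extract_mesh_token_from_line_py line → Spec_extract_mesh_token_from_line_py line (extract_mesh_token_from_line_py line)

-- ===== LEMMAS AND PROOFS =====

theorem pvB_loop_eq (r : List String) (fb : Option String) :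
    pvB_loop r fb =
      match pvA_loop1 r with
      | some v => some v
      | none => match fb with
                | some v => some v
                | none => pvA_loop2 r := by
  induction r generalizing fb with
  | nil => cases fb <;> simp [pvB_loop, pvA_loop1, pvA_loop2]
  | cons t rest ih =>
    simp only [pvB_loop, pvA_loop1, pvA_loop2]
    rw [ih]
    cases fb <;> cases hA : pvA_loop1 rest <;> split_ifs <;> simp_all

-- ===== VERDICT (by name: the statement is the Claim_ definition above) =====
theorem extract_mesh_token_from_line_py_spec : Claim_equal_extract_mesh_token_from_line_py := by
  intro line _
  unfold Spec_extract_mesh_token_from_line_py extract_mesh_token_from_line_py extract_mesh_token_from_line_py_alt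
  rw [pvB_loop_eq]
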